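-- pv_equiv track=rewrite | github.com/Fatdevil/GolfIQ-YOLO | cv_engine/capture/quality.py | _recommendations_for
-- ===== SOURCE A (Python) =====
-- from typing import Any, Iterable, Sequence
--
-- def _recommendations_for(codes: Sequence[str]) -> list[str]:
--     mapping = {
--         "LOW_FPS": "Enable slow-motion mode or increase capture FPS (120+ recommended).",
--         "LOW_RESOLUTION": "Increase capture resolution (1080p+ recommended).",
--         "UNDEREXPOSED": "Improve lighting or move to a brighter area.",
--         "OVEREXPOSED": "Avoid harsh direct light; reduce exposure if possible.",
--         "MOTION_BLUR": "Use a faster shutter or stabilize the camera to reduce blur.",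
--         "CAMERA_SHAKE": "Use a tripod or stabilize the phone to reduce shake.",
--     }
--     recommendations: list[str] = []
--     for code in codes:
--         recommendation = mapping.get(code)
--         if recommendation and recommendation not in recommendations:
--             recommendations.append(recommendation)
--     return recommendations
-- ===== SOURCE B (Python) =====
-- def _recommendations_for(codes):
--     mapping = {
--         "LOW_FPS": "Enable slow-motion mode or increase capture FPS (120+ recommended).",
--         "LOW_RESOLUTION": "Increase capture resolution (1080p+ recommended).",
--         "UNDEREXPOSED": "Improve lighting or move to a brighter area.",
--         "OVEREXPOSED": "Avoid harsh direct light; reduce exposure if possible.",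
--         "MOTION_BLUR": "Use a faster shutter or stabilize the camera to reduce blur.",
--         "CAMERA_SHAKE": "Use a tripod or stabilize the phone to reduce shake.",
--     }
--     codes = list(codes)
--     # Invert the traversal: loop over the (constant, duplicate-free) mapping entries,
--     # locate each key's first occurrence in codes, and order hits by that position.
--     hits = [(codes.index(key), rec) for key, rec in mapping.items() if key in codes]
--     hits.sort(key=lambda hit: hit[0])
--     return [rec for _, rec in hits]
-- ===== Notes on version B (the rewrite author's own statement) =====
-- stated objective: alternative
-- what changed: Inverts the traversal: instead of scanning codes with a growing result list and an inner membership check, B loops over the six constant mapping entries, finds each key's first index in codes, and sorts the hits by that index; no dedup pass is needed because the mapping's entries are duplicate-free.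
import Mathlib
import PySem

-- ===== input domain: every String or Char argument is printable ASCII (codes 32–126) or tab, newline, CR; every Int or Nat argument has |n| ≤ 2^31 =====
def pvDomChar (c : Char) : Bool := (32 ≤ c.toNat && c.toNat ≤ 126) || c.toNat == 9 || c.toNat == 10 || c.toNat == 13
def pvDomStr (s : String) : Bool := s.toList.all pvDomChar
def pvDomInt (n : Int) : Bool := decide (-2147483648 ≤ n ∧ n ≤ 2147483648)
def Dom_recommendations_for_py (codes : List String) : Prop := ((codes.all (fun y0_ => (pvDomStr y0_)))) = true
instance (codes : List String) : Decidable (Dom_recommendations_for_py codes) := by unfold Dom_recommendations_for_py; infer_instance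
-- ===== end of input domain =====

-- B inverts the traversal: it loops over the six constant mapping entries, finds each key's
-- first index in codes and sorts the hits by that index, instead of A's scan of codes with a
-- growing result list; objective: alternative.


-- shared literal: the `mapping` dict both Python versions define identically
def pvMapping : PySem.Dict String String := PySem.Dict.ofList
  [ ("LOW_FPS", "Enable slow-motion mode or increase capture FPS (120+ recommended)."),
    ("LOW_RESOLUTION", "Increase capture resolution (1080p+ recommended)."),
    ("UNDEREXPOSED", "Improve lighting or move to a brighter area."),
    ("OVEREXPOSED", "Avoid harsh direct light; reduce exposure if possible."),
    ("MOTION_BLUR", "Use a faster shutter or stabilize the camera to reduce blur."),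
    ("CAMERA_SHAKE", "Use a tripod or stabilize the phone to reduce shake.") ]

-- ===== PORT A =====
-- `if recommendation and …`: recommendation is None (match none) or a string, truthy iff nonempty
def recommendations_for_py (codes : List String) : List String :=
  codes.foldl
    (fun recommendations code =>
      match pvMapping.get? code with
      | some recommendation =>
          if !(recommendation == "") && !(recommendations.contains recommendation) then
            recommendations ++ [recommendation]
          else recommendations
      | none => recommendations)
    []

-- ===== PORT B =====
-- hits = [(codes.index(key), rec) for key, rec in mapping.items() if key in codes];
-- codes.index is total here (the filter guarantees key ∈ codes), hence the getD 0;
-- hits.sort(key=lambda hit: hit[0]); return [rec for _, rec in hits]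
def recommendations_for_py_alt (codes : List String) : List String :=
  let hits :=
    (pvMapping.items.filter (fun p => codes.contains p.1)).map
      (fun p => ((((PySem.List.index? codes p.1).getD 0 : Nat) : Int), p.2))
  (PySem.List.sorted hits (fun hit => hit.1) false).map (fun hit => hit.2)

-- ===== PRECONDITION & SPEC =====
def Spec_recommendations_for_py (codes : List String) (out : List String) : Prop := out = recommendations_for_py_alt codes
instance (codes : List String) (out : List String) : Decidable (Spec_recommendations_for_py codes out) := by unfold Spec_recommendations_for_py; infer_instance

-- ===== CLAIM (what is proved, stated in full; the proofs are below) =====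
def Claim_equal_recommendations_for_py : Prop := ∀ (codes : List String), Dom_recommendations_for_py codes → Spec_recommendations_for_py codes (recommendations_for_py codes)

-- ===== LEMMAS AND PROOFS =====

-- the mapping's entries as a plain association list
def pvItems : List (String × String) :=
  [ ("LOW_FPS", "Enable slow-motion mode or increase capture FPS (120+ recommended)."),
    ("LOW_RESOLUTION", "Increase capture resolution (1080p+ recommended)."),
    ("UNDEREXPOSED", "Improve lighting or move to a brighter area."),
    ("OVEREXPOSED", "Avoid harsh direct light; reduce exposure if possible."),
    ("MOTION_BLUR", "Use a faster shutter or stabilize the camera to reduce blur."),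
    ("CAMERA_SHAKE", "Use a tripod or stabilize the phone to reduce shake.") ]

-- the key that maps to a given recommendation (values are pairwise distinct)
def pvKey (r : String) : String :=
  ((pvItems.find? (fun p => p.2 == r)).map Prod.fst).getD ""

theorem pvMapping_items : pvMapping.items = pvItems := by decide

theorem pvKeysNodup : pvMapping.keys.Nodup := by decide

theorem pvKey_inv : ∀ p ∈ pvItems, pvKey p.2 = p.1 := by decide

theorem pvItems_nodup : pvItems.Nodup := by decide

theorem pvItems_snd_inj : ∀ p ∈ pvItems, ∀ q ∈ pvItems, p.2 = q.2 → p = q := by decide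

theorem pvItems_val_ne_empty : ∀ p ∈ pvItems, (p.2 == "") = false := by decide

-- A's loop body, named
def pvStep (recommendations : List String) (code : String) : List String :=
  match pvMapping.get? code with
  | some recommendation =>
      if !(recommendation == "") && !(recommendations.contains recommendation) then
        recommendations ++ [recommendation]
      else recommendations
  | none => recommendations

theorem pvGet?_iff (c : String) (r : String) :
    pvMapping.get? c = some r ↔ (c, r) ∈ pvItems := by
  rw [← pvMapping_items]
  exact PySem.Dict.get?_eq_some_iff_mem_items pvMapping c r pvKeysNodup

-- a member's first index is below the list's length
theorem pvIdx_lt (l : List String) (v : String) (h : v ∈ l) :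
    ∃ i, PySem.List.index? l v = some i ∧ i < l.length := by
  have hs : (PySem.List.index? l v).isSome := (PySem.List.index?_isSome_iff l v).2 h
  obtain ⟨i, hi⟩ := Option.isSome_iff_exists.1 hs
  obtain ⟨hk, -, -⟩ := PySem.List.getElem_of_index?_eq_some hi
  exact ⟨i, hi, hk⟩

-- the loop invariant: after consuming `pre`, the accumulator holds exactly the
-- recommendations whose key occurs in `pre`, ordered by the key's first index in `pre`
theorem pvInvariant (suf : List String) : ∀ (pre : List String) (acc : List String),
    (∀ r, r ∈ acc ↔ ∃ p ∈ pvItems, p.2 = r ∧ p.1 ∈ pre) →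
    acc.Pairwise (fun a b =>
      (PySem.List.index? pre (pvKey a)).getD 0 < (PySem.List.index? pre (pvKey b)).getD 0) →
    (∀ r, r ∈ suf.foldl pvStep acc ↔ ∃ p ∈ pvItems, p.2 = r ∧ p.1 ∈ (pre ++ suf)) ∧
    (suf.foldl pvStep acc).Pairwise (fun a b =>
      (PySem.List.index? (pre ++ suf) (pvKey a)).getD 0 <
      (PySem.List.index? (pre ++ suf) (pvKey b)).getD 0) := by
  induction suf with
  | nil =>
    intro pre acc hmem hpw
    simp only [List.foldl_nil, List.append_nil]
    exact ⟨hmem, hpw⟩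
  | cons c rest ih =>
    intro pre acc hmem hpw
    -- every accumulated recommendation's key already occurs in pre
    have hkey : ∀ a ∈ acc, pvKey a ∈ pre := by
      intro a ha
      obtain ⟨p, hp, hpr, hpre⟩ := (hmem a).1 ha
      rw [← hpr, pvKey_inv p hp]; exact hpre
    -- transferring the order relation from pre to pre ++ [c]
    have htrans : ∀ a ∈ acc,
        PySem.List.index? (pre ++ [c]) (pvKey a) = PySem.List.index? pre (pvKey a) := by
      intro a ha
      exact PySem.List.index?_append_of_mem [c] (hkey a ha)
    have hpw' : acc.Pairwise (fun a b =>
        (PySem.List.index? (pre ++ [c]) (pvKey a)).getD 0 <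
        (PySem.List.index? (pre ++ [c]) (pvKey b)).getD 0) := by
      refine hpw.imp_of_mem ?_
      intro a b ha hb h
      rw [htrans a ha, htrans b hb]; exact h
    have hstep : ∀ (acc' : List String),
        acc' = pvStep acc c →
        (∀ r, r ∈ acc' ↔ ∃ p ∈ pvItems, p.2 = r ∧ p.1 ∈ pre ++ [c]) →
        acc'.Pairwise (fun a b =>
          (PySem.List.index? (pre ++ [c]) (pvKey a)).getD 0 <
          (PySem.List.index? (pre ++ [c]) (pvKey b)).getD 0) →
        (∀ r, r ∈ (c :: rest).foldl pvStep acc ↔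
            ∃ p ∈ pvItems, p.2 = r ∧ p.1 ∈ pre ++ c :: rest) ∧
        ((c :: rest).foldl pvStep acc).Pairwise (fun a b =>
          (PySem.List.index? (pre ++ c :: rest) (pvKey a)).getD 0 <
          (PySem.List.index? (pre ++ c :: rest) (pvKey b)).getD 0) := by
      intro acc' heq hm' hp'
      have := ih (pre ++ [c]) acc' hm' hp'
      rw [List.append_assoc, List.singleton_append] at this
      rw [List.foldl_cons, ← heq]
      exact this
    cases hg : pvMapping.get? c with
    | none =>
      refine hstep acc (by simp [pvStep, hg]) ?_ hpw'
      intro r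
      rw [hmem r]
      constructor
      · rintro ⟨p, hp, hpr, hpre⟩; exact ⟨p, hp, hpr, by simp [hpre]⟩
      · rintro ⟨p, hp, hpr, hpre⟩
        refine ⟨p, hp, hpr, ?_⟩
        rcases List.mem_append.1 hpre with h | h
        · exact h
        · exfalso
          simp only [List.mem_singleton] at h
          rw [(pvGet?_iff c p.2).2 (by rw [← h]; exact hp)] at hg
          exact Option.some_ne_none _ hg
    | some r =>
      have hcr : (c, r) ∈ pvItems := (pvGet?_iff c r).1 hg
      have hne : (r == "") = false := pvItems_val_ne_empty (c, r) hcr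
      have hkr : pvKey r = c := pvKey_inv (c, r) hcr
      cases hcont : acc.contains r with
      | true =>
        -- r already collected, hence c already occurred in pre
        have hrin : r ∈ acc := by have h := hcont; simp at h; exact h
        refine hstep acc (by simp [pvStep, hg, hne, hrin]) ?_ hpw'
        intro r'
        rw [hmem r']
        constructor
        · rintro ⟨p, hp, hpr, hpre⟩; exact ⟨p, hp, hpr, by simp [hpre]⟩
        · rintro ⟨p, hp, hpr, hpre⟩
          refine ⟨p, hp, hpr, ?_⟩
          rcases List.mem_append.1 hpre with h | h
          · exact h
          · simp only [List.mem_singleton] at h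
            -- p.1 = c, and r ∈ acc already puts c in pre
            obtain ⟨q, hq, hqr, hqpre⟩ := (hmem r).1 hrin
            have hqc : q = (c, r) := pvItems_snd_inj q hq (c, r) hcr (by rw [hqr])
            rw [h]
            rw [hqc] at hqpre
            exact hqpre
      | false =>
        have hrout : r ∉ acc := by have h := hcont; simp at h; exact h
        -- c has not occurred in pre
        have hcpre : c ∉ pre := by
          intro hc
          exact hrout ((hmem r).2 ⟨(c, r), hcr, rfl, hc⟩)
        refine hstep (acc ++ [r]) (by simp [pvStep, hg, hne, hrout]) ?_ ?_
        · intro r'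
          simp only [List.mem_append, List.mem_singleton, hmem r']
          constructor
          · rintro (⟨p, hp, hpr, hpre⟩ | h)
            · exact ⟨p, hp, hpr, by simp [hpre]⟩
            · exact ⟨(c, r), hcr, h.symm, by simp⟩
          · rintro ⟨p, hp, hpr, hpre⟩
            rcases hpre with h | h
            · exact Or.inl ⟨p, hp, hpr, h⟩
            · have : p = (c, r) := by
                have h2 : pvMapping.get? p.1 = some p.2 := (pvGet?_iff p.1 p.2).2 hp
                rw [h, hg] at h2
                have : p.2 = r := (Option.some.inj h2).symm
                calc p = (p.1, p.2) := rfl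
                  _ = (c, r) := by rw [h, this]
              exact Or.inr (by rw [← hpr, this])
        · rw [List.pairwise_append]
          refine ⟨hpw', List.pairwise_singleton _ _, ?_⟩
          intro a ha b hb
          simp only [List.mem_singleton] at hb
          subst hb
          obtain ⟨i, hi, hlt⟩ := pvIdx_lt pre (pvKey a) (hkey a ha)
          rw [htrans a ha, hi, hkr, PySem.List.index?_append_singleton_self pre c hcpre]
          simpa using hlt
    
-- A's output: membership characterisation and strict first-index ordering
theorem pvA_mem (codes : List String) (r : String) :
    r ∈ recommendations_for_py codes ↔ ∃ p ∈ pvItems, p.2 = r ∧ p.1 ∈ codes := by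
  have h := pvInvariant codes [] [] (by simp) (by simp)
  have e : recommendations_for_py codes = codes.foldl pvStep [] := rfl
  rw [e]
  simpa only [List.nil_append] using h.1 r

theorem pvA_pairwise (codes : List String) :
    (recommendations_for_py codes).Pairwise (fun a b =>
      (PySem.List.index? codes (pvKey a)).getD 0 < (PySem.List.index? codes (pvKey b)).getD 0) := by
  have h := pvInvariant codes [] [] (by simp) (by simp)
  have e : recommendations_for_py codes = codes.foldl pvStep [] := rfl
  rw [e]
  simpa only [List.nil_append] using h.2

-- ===== VERDICT (by name: the statement is the Claim_ definition above) =====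
theorem recommendations_for_py_spec : Claim_equal_recommendations_for_py := by
  intro codes _
  show recommendations_for_py codes = recommendations_for_py_alt codes
  have halt : recommendations_for_py_alt codes =
      (PySem.List.sorted
        ((pvItems.filter (fun p => codes.contains p.1)).map
          (fun p => ((((PySem.List.index? codes p.1).getD 0 : Nat) : Int), p.2)))
        (fun hit => hit.1) false).map (fun hit => hit.2) := by
    unfold recommendations_for_py_alt
    rw [pvMapping_items]
  rw [halt]
  set pair : String → Int × String :=
    fun r => ((((PySem.List.index? codes (pvKey r)).getD 0 : Nat) : Int), r) with hpair
  -- A's output is duplicate-free (its first-occurrence indices strictly increase)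
  have hnodA : (recommendations_for_py codes).Nodup :=
    (pvA_pairwise codes).imp (fun {a b} h => fun e => by subst e; exact lt_irrefl _ h)
  have hnd1 : ((recommendations_for_py codes).map pair).Nodup :=
    hnodA.map (fun a b h => congrArg Prod.snd h)
  have hnd2 : ((pvItems.filter (fun p => codes.contains p.1)).map
      (fun p => ((((PySem.List.index? codes p.1).getD 0 : Nat) : Int), p.2))).Nodup := by
    refine List.Nodup.map_on ?_ (pvItems_nodup.filter _)
    intro p hp q hq hfe
    have hsnd : p.2 = q.2 := by
      simp only [Prod.mk.injEq] at hfe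
      exact hfe.2
    exact pvItems_snd_inj p (List.mem_of_mem_filter hp) q (List.mem_of_mem_filter hq) hsnd
  -- same members: recommendations paired with their key's first index
  have hmemx : ∀ x, x ∈ (recommendations_for_py codes).map pair ↔
      x ∈ (pvItems.filter (fun p => codes.contains p.1)).map
        (fun p => ((((PySem.List.index? codes p.1).getD 0 : Nat) : Int), p.2)) := by
    intro x
    simp only [List.mem_map, List.mem_filter]
    constructor
    · rintro ⟨r, hr, rfl⟩
      obtain ⟨p, hp, hpr, hpc⟩ := (pvA_mem codes r).1 hr
      refine ⟨p, ⟨hp, by simpa using hpc⟩, ?_⟩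
      rw [← hpr]
      simp [hpair, pvKey_inv p hp]
    · rintro ⟨p, ⟨hp, hpc⟩, rfl⟩
      refine ⟨p.2, (pvA_mem codes p.2).2 ⟨p, hp, rfl, by simpa using hpc⟩, ?_⟩
      simp [hpair, pvKey_inv p hp]
  have hperm := (List.perm_ext_iff_of_nodup hnd1 hnd2).mpr hmemx
  have hpw : ((recommendations_for_py codes).map pair).Pairwise
      (fun a b => a.1 < b.1) := by
    rw [List.pairwise_map]
    exact (pvA_pairwise codes).imp (fun {a b} h => by simp only [hpair]; exact_mod_cast h)
  rw [PySem.List.sorted_eq_of_perm_of_pairwise_lt _ _ (fun hit => hit.1) hperm hpw, List.map_map]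
  exact (List.map_id _).symm
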